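-- pv_equiv track=rewrite | github.com/keith-nuzzolo/Hacker_Rank | incomplete/sherlock_and_the_beast.py | num_5
-- ===== SOURCE A (Python) =====
-- def num_5(digits):
--     ''' returns number of five's to put into the decent number
--     '''
--     num = 0
--     if( digits % 3 == 0):
--         while digits > 0:
--             digits +=  -3
--             num += 1
--     else:
--         while digits > 0 and digits % 3 != 0:
--             digits += -3
--             num += 1
--     if digits % 5 == 0:
--         return num
--     else:
--         return 0
-- ===== SOURCE B (Python) =====
-- def num_5(digits):
--     ''' returns number of five's to put into the decent number
--     '''
--     return digits // 3 if digits > 0 and digits % 3 == 0 else 0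
-- ===== Notes on version B (the rewrite author's own statement) =====
-- stated objective: faster
-- what changed: Replaced the subtract-3 loops and the final %5 test with a closed-form expression: digits//3 when digits is positive and divisible by 3, else 0.
import Mathlib
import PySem

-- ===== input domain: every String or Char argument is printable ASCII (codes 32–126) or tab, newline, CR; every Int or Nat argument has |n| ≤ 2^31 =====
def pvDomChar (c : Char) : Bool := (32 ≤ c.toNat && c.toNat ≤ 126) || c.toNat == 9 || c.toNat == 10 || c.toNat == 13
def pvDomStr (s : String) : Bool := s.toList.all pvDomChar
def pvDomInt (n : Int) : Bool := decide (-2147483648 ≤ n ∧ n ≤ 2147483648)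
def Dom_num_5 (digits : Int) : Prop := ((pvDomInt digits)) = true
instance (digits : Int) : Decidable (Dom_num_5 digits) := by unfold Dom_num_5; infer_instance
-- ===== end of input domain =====

-- B replaces A's subtract-3 loops with a closed-form O(1) expression (faster, asymptotic).


-- ===== PORT A =====
-- 'while digits > 0: digits += -3; num += 1'
def num_5_loop1 (digits num : Int) : Int × Int :=
  if 0 < digits then num_5_loop1 (digits + (-3)) (num + 1) else (digits, num)
termination_by digits.toNat
decreasing_by omega

-- 'while digits > 0 and digits % 3 != 0: digits += -3; num += 1'
def num_5_loop2 (digits num : Int) : Int × Int :=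
  if 0 < digits ∧ digits % 3 ≠ 0 then num_5_loop2 (digits + (-3)) (num + 1) else (digits, num)
termination_by digits.toNat
decreasing_by omega

def num_5 (digits : Int) : Int :=
  let st := if digits % 3 = 0 then num_5_loop1 digits 0 else num_5_loop2 digits 0
  if st.1 % 5 = 0 then st.2 else 0

-- ===== PORT B =====
def num_5_alt (digits : Int) : Int :=
  if 0 < digits ∧ digits % 3 = 0 then PySem.Int.floordiv digits 3 else 0

-- ===== PRECONDITION & SPEC =====
def Spec_num_5 (digits : Int) (out : Int) : Prop := out = num_5_alt digits
instance (digits : Int) (out : Int) : Decidable (Spec_num_5 digits out) := by unfold Spec_num_5; infer_instance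

-- ===== CLAIM (what is proved, stated in full; the proofs are below) =====
def Claim_equal_num_5 : Prop := ∀ (digits : Int), Dom_num_5 digits → Spec_num_5 digits (num_5 digits)

-- ===== LEMMAS AND PROOFS =====
lemma num_5_loop1_mul3 : ∀ (k : ℕ) (num : Int), num_5_loop1 (3 * (k : Int)) num = (0, num + k) := by
  intro k
  induction k with
  | zero => intro num; rw [num_5_loop1]; norm_num
  | succ n ih =>
      intro num
      rw [num_5_loop1]
      have h : (0 : Int) < 3 * ((n + 1 : ℕ) : Int) := by push_cast; omega
      rw [if_pos h]
      have h2 : 3 * ((n + 1 : ℕ) : Int) + (-3) = 3 * (n : Int) := by push_cast; ring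
      rw [h2, ih]
      push_cast; ring_nf

lemma num_5_loop1_nonpos (digits num : Int) (h : digits ≤ 0) :
    num_5_loop1 digits num = (digits, num) := by
  rw [num_5_loop1, if_neg (by omega)]

lemma num_5_loop2_nonpos (digits num : Int) (h : ¬(0 < digits ∧ digits % 3 ≠ 0)) :
    num_5_loop2 digits num = (digits, num) := by
  rw [num_5_loop2, if_neg h]

lemma num_5_loop2_pos_aux : ∀ (n : ℕ) (digits : Int), digits.toNat ≤ n → 0 < digits → digits % 3 ≠ 0 → ∀ (num : Int),
    -3 < (num_5_loop2 digits num).1 ∧ (num_5_loop2 digits num).1 < 0 := by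
  intro n
  induction n with
  | zero => intro d hd hp _ _; omega
  | succ m ih =>
      intro d hd hp h3 num
      rw [num_5_loop2, if_pos ⟨hp, h3⟩]
      by_cases hd3 : 0 < d + (-3)
      · exact ih (d + (-3)) (by omega) hd3 (by omega) (num + 1)
      · rw [num_5_loop2_nonpos _ _ (by omega)]
        constructor <;> simp <;> omega

lemma num_5_loop2_pos (digits : Int) (hp : 0 < digits) (h3 : digits % 3 ≠ 0) (num : Int) :
    -3 < (num_5_loop2 digits num).1 ∧ (num_5_loop2 digits num).1 < 0 :=
  num_5_loop2_pos_aux digits.toNat digits le_rfl hp h3 num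

theorem num_5_spec : Claim_equal_num_5 := by
  intro digits _
  unfold Spec_num_5 num_5 num_5_alt
  by_cases h3 : digits % 3 = 0
  · simp only [if_pos h3]
    by_cases hp : 0 < digits
    · obtain ⟨k, hk⟩ : ∃ k : ℕ, digits = 3 * (k : Int) := ⟨digits.toNat / 3, by omega⟩
      have hc : 0 < 3 * (k : Int) ∧ 3 * (k : Int) % 3 = 0 := by constructor <;> omega
      have hf : PySem.Int.floordiv (3 * (k : Int)) 3 = (k : Int) := by
        rw [PySem.Int.floordiv_eq_ediv_of_pos (by norm_num)]
        omega
      rw [hk, num_5_loop1_mul3, if_pos hc, hf]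
      norm_num
    · rw [num_5_loop1_nonpos _ _ (by omega),
          if_neg (show ¬(0 < digits ∧ digits % 3 = 0) from fun hc => hp hc.1)]
      split <;> rfl
  · simp only [if_neg h3]
    rw [if_neg (show ¬(0 < digits ∧ digits % 3 = 0) from fun hc => h3 hc.2)]
    by_cases hp : 0 < digits
    · have hb := num_5_loop2_pos digits hp h3 0
      have h5 : ¬((num_5_loop2 digits 0).1 % 5 = 0) := by omega
      rw [if_neg h5]
    · rw [num_5_loop2_nonpos _ _ (fun hc => hp hc.1)]
      split <;> rfl
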